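-- pv_equiv track=rewrite | github.com/TEAMLAB-Lecture/morsecode-BGCho96 | morsecode.py | is_validated_english_sentence
-- ===== SOURCE A (Python) =====
-- def is_validated_english_sentence(user_input):
--     """
--     Input:
--         - user_input : 문자열값으로 사용자가 입력하는 문자
--     Output:
--         - 입력한 값이 아래에 해당될 경우 False, 그렇지 않으면 True
--           1) 숫자가 포함되어 있거나,
--           2) _@#$%^&*()-+=:\[]{}"';|`~ 와 같은 특수문자가 포함되어 있거나
--           3) 문장부호(.,!?)를 제외하면 입력값이 없거나 빈칸만 입력했을 경우
--     Examples:
--         >>> import morsecode as mc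
--         >>> mc.is_validated_english_sentence("Hello 123")
--         False
--         >>> mc.is_validated_english_sentence("Hi!")
--         True
--         >>> mc.is_validated_english_sentence(".!.")
--         False
--         >>> mc.is_validated_english_sentence("!.!")
--         False
--         >>> mc.is_validated_english_sentence("kkkkk... ^^;")
--         False
--         >>> mc.is_validated_english_sentence("This is Gachon University.")
--         True
--     """
--     # ===Modify codes below=============
--     # 조건에 따라 변환되어야 할 결과를 result 변수에 할당 또는 필요에 따라 자유로운 수정
--     result = None
--     # 123을 다 만족하는 조건은? 알파벳 아니면 4개의 부호로만 있어야함.+4개 부호+spacebar 제외한 나머지 문자 요소가 아에 없으면 false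
--     sack=[]
--     excuse=['.',',','!','?',' ']
--     for let in user_input:
--         if let.isalpha():
--             sack.append(let)
--         elif let not in excuse:
--             return False
--     if not sack:
--         return False
--     return True
-- ===== SOURCE B (Python) =====
-- def is_validated_english_sentence(user_input):
--     # Strip all allowed punctuation and spaces, then test the remainder with
--     # str.isalpha, which is False on the empty string (covers empty/space-only
--     # /punctuation-only input) and False if any disallowed char remains.
--     stripped = user_input
--     for ch in '.,!? ':
--         stripped = stripped.replace(ch, '')
--     return stripped.isalpha()
-- ===== Notes on version B (the rewrite author's own statement) =====
-- stated objective: simpler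
-- what changed: Instead of scanning characters with a sack accumulator and per-character branching/early returns, B stages the work: it first deletes every allowed punctuation character and space with str.replace, then returns str.isalpha() of the remainder, whose empty-string-is-False rule subsumes A's non-empty-sack check.
import Mathlib
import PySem

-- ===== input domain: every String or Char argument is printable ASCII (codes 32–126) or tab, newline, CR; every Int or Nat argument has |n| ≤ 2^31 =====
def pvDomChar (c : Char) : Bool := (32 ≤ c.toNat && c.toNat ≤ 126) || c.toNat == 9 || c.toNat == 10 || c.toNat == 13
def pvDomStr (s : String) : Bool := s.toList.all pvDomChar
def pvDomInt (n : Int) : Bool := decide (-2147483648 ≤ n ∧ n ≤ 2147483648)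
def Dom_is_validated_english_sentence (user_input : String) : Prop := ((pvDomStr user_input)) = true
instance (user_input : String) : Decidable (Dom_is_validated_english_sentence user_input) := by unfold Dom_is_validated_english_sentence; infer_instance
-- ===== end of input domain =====

-- B stages the work: delete allowed punctuation/space via str.replace, then one str.isalpha test (simpler decomposition, not claimed faster).


-- ===== PORT A =====
def pvExcuse : List Char := ['.', ',', '!', '?', ' ']

def pvGoA : List Char → List Char → Bool
  | [], sack => if sack.isEmpty then false else true
  | c :: rest, sack =>
      if PySem.Chars.isalpha c then pvGoA rest (sack ++ [c])
      else if pvExcuse.contains c then pvGoA rest sack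
      else false

def is_validated_english_sentence (user_input : String) : Bool :=
  pvGoA user_input.toList []

-- ===== PORT B =====
-- B: for ch in '.,!? ': stripped = stripped.replace(ch, '');  return stripped.isalpha()
def is_validated_english_sentence_alt (user_input : String) : Bool :=
  PySem.Str.strIsalpha
    ((".,!? ".toList).foldl (fun s ch => PySem.Str.replace s (String.ofList [ch]) "") user_input)

-- ===== PRECONDITION & SPEC =====
def Spec_is_validated_english_sentence (user_input : String) (out : Bool) : Prop := out = is_validated_english_sentence_alt user_input
instance (user_input : String) (out : Bool) : Decidable (Spec_is_validated_english_sentence user_input out) := by unfold Spec_is_validated_english_sentence; infer_instance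

-- ===== CLAIM (what is proved, stated in full; the proofs are below) =====
def Claim_equal_is_validated_english_sentence : Prop := ∀ (user_input : String), Dom_is_validated_english_sentence user_input → Spec_is_validated_english_sentence user_input (is_validated_english_sentence user_input)

-- ===== LEMMAS AND PROOFS =====

-- A's loop computes: (sack nonempty OR some letter ahead) AND every char is a letter or allowed.
theorem pvGoA_eq (cs : List Char) : ∀ sack : List Char,
    pvGoA cs sack =
      ((!sack.isEmpty || cs.any (fun c => PySem.Chars.isalpha c)) &&
       cs.all (fun c => PySem.Chars.isalpha c || pvExcuse.contains c)) := by
  induction cs with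
  | nil => intro sack; cases sack <;> simp [pvGoA]
  | cons c rest ih =>
    intro sack
    simp only [pvGoA, List.any_cons, List.all_cons]
    by_cases h1 : PySem.Chars.isalpha c = true
    · rw [if_pos h1, ih]
      simp [h1]
    · rw [if_neg h1]
      by_cases h2 : pvExcuse.contains c = true
      · rw [if_pos h2, ih]
        have h2' : c ∈ pvExcuse := by simpa using h2
        simp [Bool.not_eq_true] at h1
        simp [h1, h2']
      · rw [if_neg h2]
        have h2' : ¬ c ∈ pvExcuse := by simpa using h2
        simp [Bool.not_eq_true] at h1
        simp [h1, h2']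

-- replace with a single-char pattern and empty replacement is a filter
theorem pvGoRepl_filter (c : Char) : ∀ (l : List Char) (fuel : Nat) (acc : List Char), l.length ≤ fuel →
    PySem.Chars.replace.go [c] [] fuel l acc = acc.reverse ++ l.filter (fun x => x != c) := by
  intro l
  induction l with
  | nil => intro fuel acc h; cases fuel <;> simp [PySem.Chars.replace.go]
  | cons a t ih =>
    intro fuel acc h
    cases fuel with
    | zero => simp at h
    | succ n =>
      simp only [List.length_cons] at h
      by_cases hac : a = c
      · subst hac
        simp only [PySem.Chars.replace.go]
        rw [if_pos (by simp [List.isPrefixOf])]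
        simp only [List.length_singleton, List.drop_succ_cons, List.drop_zero, List.reverse_nil,
          List.nil_append]
        rw [ih n acc (by omega)]
        simp
      · simp only [PySem.Chars.replace.go]
        rw [if_neg (by simp [List.isPrefixOf, Ne.symm hac])]
        rw [ih n (a :: acc) (by omega)]
        have : (a != c) = true := by simp [hac]
        simp [List.filter, this]

theorem pvRepl_filter (c : Char) (cs : List Char) :
    PySem.Chars.replace cs [c] [] = cs.filter (fun x => x != c) := by
  simp [PySem.Chars.replace, pvGoRepl_filter c cs cs.length [] le_rfl]

-- the whole fold of replaces deletes exactly the characters of the list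
theorem pvFold_filter : ∀ (chs : List Char) (s : String),
    (chs.foldl (fun s ch => PySem.Str.replace s (String.ofList [ch]) "") s).toList
      = s.toList.filter (fun x => !chs.contains x) := by
  intro chs
  induction chs with
  | nil => intro s; simp
  | cons c rest ih =>
    intro s
    simp only [List.foldl_cons]
    rw [ih]
    rw [PySem.Str.toList_replace, String.toList_ofList,
        show ("" : String).toList = [] by decide]
    rw [pvRepl_filter]
    rw [List.filter_filter]
    apply List.filter_congr
    intro x _
    by_cases h : x = c <;> simp [h]

theorem is_validated_english_sentence_spec : Claim_equal_is_validated_english_sentence := by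
  intro u _
  unfold Spec_is_validated_english_sentence is_validated_english_sentence is_validated_english_sentence_alt
  rw [pvGoA_eq, PySem.Str.strIsalpha_eq, pvFold_filter, PySem.Chars.strIsalpha, Bool.eq_iff_iff]
  have halpha_exc : ∀ c ∈ pvExcuse, PySem.Chars.isalpha c = false := by
    intro c hc
    fin_cases hc <;> rfl
  have hlist : ".,!? ".toList = pvExcuse := by rfl
  rw [hlist]
  generalize hE : pvExcuse = E at halpha_exc ⊢
  simp
  constructor
  · rintro ⟨⟨a, ha, hal⟩, hall⟩
    have hna : a ∉ E := fun hm => by simp [halpha_exc a hm] at hal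
    exact ⟨⟨a, ha, hna⟩, fun x hx => (hall x hx).elim Or.inr Or.inl⟩
  · rintro ⟨⟨a, ha, hna⟩, hall⟩
    refine ⟨⟨a, ha, ?_⟩, fun x hx => (hall x hx).elim Or.inr Or.inl⟩
    rcases hall a ha with h | h
    · exact absurd h hna
    · exact h
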